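-- pv_equiv track=rewrite | github.com/kirtika01/task-extractor | main1.py | is_task_sentence
-- ===== SOURCE A (Python) =====
-- def is_task_sentence(pos_tags):
--     for i in range(len(pos_tags) - 1):
--         current_tag = pos_tags[i][1]
--         next_tag = pos_tags[i+1][1] if i+1 < len(pos_tags) else None
--         if current_tag in ['MD'] and next_tag in ['VB', 'VBP', 'VBZ', 'VBD']:
--             return True
--     for i in range(len(pos_tags) - 2):
--         tag1 = pos_tags[i][1]
--         tag2 = pos_tags[i+1][1] if i+1 < len(pos_tags) else None
--         tag3 = pos_tags[i+2][1] if i+2 < len(pos_tags) else None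
--         if tag1 in ['VBZ', 'VBP', 'VBD'] and tag2 == 'TO' and tag3 in ['VB', 'VBP']:
--             return True
--     return False
-- ===== SOURCE B (Python) =====
-- def is_task_sentence(pos_tags):
--     p2 = p1 = None
--     for _, tag in pos_tags:
--         if p1 == 'MD' and tag in ('VB', 'VBP', 'VBZ', 'VBD'):
--             return True
--         if p2 in ('VBZ', 'VBP', 'VBD') and p1 == 'TO' and tag in ('VB', 'VBP'):
--             return True
--         p2, p1 = p1, tag
--     return False
-- ===== Notes on version B (the rewrite author's own statement) =====
-- stated objective: alternative
-- what changed: A's two sequential index-based scans (all bigrams by pos_tags[i]/pos_tags[i+1], then all trigrams) are replaced by a single left-to-right pass over the pairs that keeps the previous two tags as state and checks both patterns at each step.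
import Mathlib
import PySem

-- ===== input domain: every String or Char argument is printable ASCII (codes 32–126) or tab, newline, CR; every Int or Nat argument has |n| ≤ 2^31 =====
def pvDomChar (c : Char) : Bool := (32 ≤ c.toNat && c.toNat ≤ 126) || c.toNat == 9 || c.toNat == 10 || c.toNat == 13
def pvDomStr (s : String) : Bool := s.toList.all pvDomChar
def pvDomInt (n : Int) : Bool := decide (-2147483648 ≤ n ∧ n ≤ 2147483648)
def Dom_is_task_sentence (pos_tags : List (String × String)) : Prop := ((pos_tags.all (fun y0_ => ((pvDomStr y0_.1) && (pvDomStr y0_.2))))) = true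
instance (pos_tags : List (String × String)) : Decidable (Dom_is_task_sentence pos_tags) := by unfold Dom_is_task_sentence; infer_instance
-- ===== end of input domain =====

-- B replaces A's two index-based scans (bigrams, then trigrams) with a single left-to-right
-- pass holding the previous two tags as state (objective: alternative decomposition, same cost).

-- ===== PORT A =====
-- second loop of A: for i in range(len(pos_tags) - 2): ...
def aLoop2 (pos_tags : List (String × String)) : List Int → Bool
  | [] => false
  | i :: rest =>
    let tag1 := (PySem.List.pyGet? pos_tags i).map Prod.snd
    let tag2 := if i + 1 < (pos_tags.length : Int) then (PySem.List.pyGet? pos_tags (i + 1)).map Prod.snd else none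
    let tag3 := if i + 2 < (pos_tags.length : Int) then (PySem.List.pyGet? pos_tags (i + 2)).map Prod.snd else none
    if ([some "VBZ", some "VBP", some "VBD"].contains tag1 && (tag2 == some "TO")
        && [some "VB", some "VBP"].contains tag3) then true
    else aLoop2 pos_tags rest

-- first loop of A: for i in range(len(pos_tags) - 1): ...; falling through runs the second loop
def aLoop1 (pos_tags : List (String × String)) : List Int → Bool
  | [] => aLoop2 pos_tags (PySem.List.pyRange 0 ((pos_tags.length : Int) - 2) 1)
  | i :: rest =>
    let current_tag := (PySem.List.pyGet? pos_tags i).map Prod.snd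
    let next_tag := if i + 1 < (pos_tags.length : Int) then (PySem.List.pyGet? pos_tags (i + 1)).map Prod.snd else none
    if ([some "MD"].contains current_tag
        && [some "VB", some "VBP", some "VBZ", some "VBD"].contains next_tag) then true
    else aLoop1 pos_tags rest

def is_task_sentence (pos_tags : List (String × String)) : Bool :=
  aLoop1 pos_tags (PySem.List.pyRange 0 ((pos_tags.length : Int) - 1) 1)

-- ===== PORT B =====
-- one pass; p2/p1 are the previous two tags (None before the list provides them)
def bLoop (p2 p1 : Option String) : List (String × String) → Bool
  | [] => false
  | t :: ts =>
    if (p1 == some "MD") && (t.2 == "VB" || t.2 == "VBP" || t.2 == "VBZ" || t.2 == "VBD") then true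
    else if ([some "VBZ", some "VBP", some "VBD"].contains p2) && (p1 == some "TO")
            && (t.2 == "VB" || t.2 == "VBP") then true
    else bLoop p1 (some t.2) ts

def is_task_sentence_alt (pos_tags : List (String × String)) : Bool :=
  bLoop none none pos_tags

-- ===== PRECONDITION & SPEC =====
def Spec_is_task_sentence (pos_tags : List (String × String)) (out : Bool) : Prop := out = is_task_sentence_alt pos_tags
instance (pos_tags : List (String × String)) (out : Bool) : Decidable (Spec_is_task_sentence pos_tags out) := by unfold Spec_is_task_sentence; infer_instance

-- ===== CLAIM (what is proved, stated in full; the proofs are below) =====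
def Claim_equal_is_task_sentence : Prop := ∀ (pos_tags : List (String × String)), Dom_is_task_sentence pos_tags → Spec_is_task_sentence pos_tags (is_task_sentence pos_tags)

-- ===== LEMMAS AND PROOFS =====


-- the two branch conditions, on optional tags
def oc1 (o1 o2 : Option String) : Bool :=
  (o1 == some "MD") && (o2 == some "VB" || o2 == some "VBP" || o2 == some "VBZ" || o2 == some "VBD")
def oc2 (o1 o2 o3 : Option String) : Bool :=
  (o1 == some "VBZ" || o1 == some "VBP" || o1 == some "VBD") && (o2 == some "TO")
    && (o3 == some "VB" || o3 == some "VBP")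

-- reference predicates on the tag list
def pAny : List String → Bool
  | a :: b :: rest => oc1 (some a) (some b) || pAny (b :: rest)
  | _ => false
def tAny : List String → Bool
  | a :: b :: c :: rest => oc2 (some a) (some b) (some c) || tAny (b :: c :: rest)
  | _ => false

-- A's branch conditions as functions of the index
def condA1 (pos_tags : List (String × String)) (i : Int) : Bool :=
  [some "MD"].contains ((PySem.List.pyGet? pos_tags i).map Prod.snd)
    && [some "VB", some "VBP", some "VBZ", some "VBD"].contains
        (if i + 1 < (pos_tags.length : Int) then (PySem.List.pyGet? pos_tags (i + 1)).map Prod.snd else none)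
def condA2 (pos_tags : List (String × String)) (i : Int) : Bool :=
  [some "VBZ", some "VBP", some "VBD"].contains ((PySem.List.pyGet? pos_tags i).map Prod.snd)
    && ((if i + 1 < (pos_tags.length : Int) then (PySem.List.pyGet? pos_tags (i + 1)).map Prod.snd else none) == some "TO")
    && [some "VB", some "VBP"].contains
        (if i + 2 < (pos_tags.length : Int) then (PySem.List.pyGet? pos_tags (i + 2)).map Prod.snd else none)

theorem if_bool (c x : Bool) : (if c = true then true else x) = (c || x) := by
  cases c <;> simp

theorem or_shuffle (c d p t : Bool) : (c || (d || (p || t))) = ((c || p) || (d || t)) := by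
  cases c <;> cases d <;> cases p <;> cases t <;> rfl

theorem aLoop2_any (pos_tags : List (String × String)) (l : List Int) :
    aLoop2 pos_tags l = l.any (condA2 pos_tags) := by
  induction l with
  | nil => simp [aLoop2]
  | cons i rest ih =>
    show (if _ then true else aLoop2 pos_tags rest) = _
    rw [if_bool, ih, List.any_cons]
    rfl

theorem aLoop1_any (pos_tags : List (String × String)) (l : List Int) :
    aLoop1 pos_tags l =
      (l.any (condA1 pos_tags)
        || aLoop2 pos_tags (PySem.List.pyRange 0 ((pos_tags.length : Int) - 2) 1)) := by
  induction l with
  | nil => simp [aLoop1]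
  | cons i rest ih =>
    show (if _ then true else aLoop1 pos_tags rest) = _
    rw [if_bool, ih, List.any_cons, Bool.or_assoc]
    rfl

theorem condA1_cast (ts : List (String × String)) (k : Nat) :
    condA1 ts (k : Int) = oc1 (ts.map Prod.snd)[k]? (ts.map Prod.snd)[k+1]? := by
  have g1 : PySem.List.pyGet? ts ((k : Int) + 1) = ts[k+1]? := by
    rw [show ((k : Int) + 1) = ((k + 1 : Nat) : Int) by push_cast; ring, PySem.List.pyGet?_natCast]
  by_cases h : (k : Int) + 1 < (ts.length : Int)
  · simp [condA1, oc1, g1, h, beq_eq_decide, List.getElem?_map, Bool.or_assoc]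
  · have h2 : (ts.map Prod.snd)[k+1]? = none := by
      rw [List.getElem?_eq_none_iff]; simp; omega
    simp [condA1, oc1, h, h2, beq_eq_decide, List.getElem?_map]

theorem condA2_cast (ts : List (String × String)) (k : Nat) :
    condA2 ts (k : Int) = oc2 (ts.map Prod.snd)[k]? (ts.map Prod.snd)[k+1]? (ts.map Prod.snd)[k+2]? := by
  have g1 : PySem.List.pyGet? ts ((k : Int) + 1) = ts[k+1]? := by
    rw [show ((k : Int) + 1) = ((k + 1 : Nat) : Int) by push_cast; ring, PySem.List.pyGet?_natCast]
  have g2 : PySem.List.pyGet? ts ((k : Int) + 2) = ts[k+2]? := by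
    rw [show ((k : Int) + 2) = ((k + 2 : Nat) : Int) by push_cast; ring, PySem.List.pyGet?_natCast]
  by_cases h : (k : Int) + 1 < (ts.length : Int) <;>
    by_cases h' : (k : Int) + 2 < (ts.length : Int)
  · simp [condA2, oc2, g1, g2, h, h', beq_eq_decide, List.getElem?_map, Bool.or_assoc]
  · have h2 : (ts.map Prod.snd)[k+2]? = none := by
      rw [List.getElem?_eq_none_iff]; simp; omega
    simp [condA2, oc2, g1, h, h', h2, beq_eq_decide, List.getElem?_map, Bool.or_assoc]
  · omega
  · have h1 : (ts.map Prod.snd)[k+1]? = none := by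
      rw [List.getElem?_eq_none_iff]; simp; omega
    have h2 : (ts.map Prod.snd)[k+2]? = none := by
      rw [List.getElem?_eq_none_iff]; simp; omega
    simp [condA2, oc2, h, h', h1, h2, beq_eq_decide, Bool.or_assoc]

theorem any_oc1_eq_pAny (M : List String) :
    (List.range (M.length - 1)).any (fun k => oc1 M[k]? M[k+1]?) = pAny M := by
  induction M with
  | nil => simp [pAny]
  | cons a M ih =>
    cases M with
    | nil => simp [pAny]
    | cons b R =>
      have hlen : (a :: b :: R).length - 1 = ((b :: R).length - 1) + 1 := by simp
      rw [hlen, List.range_succ_eq_map]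
      simp only [List.any_cons, List.any_map]
      rw [show ((fun k => oc1 (a :: b :: R)[k]? (a :: b :: R)[k+1]?) ∘ Nat.succ)
            = (fun k => oc1 (b :: R)[k]? (b :: R)[k+1]?) from
          funext fun k => by simp [Function.comp, Nat.succ_eq_add_one]]
      rw [ih]
      show (oc1 (a :: b :: R)[0]? (a :: b :: R)[0+1]? || pAny (b :: R)) = pAny (a :: b :: R)
      show _ = (oc1 (some a) (some b) || pAny (b :: R))
      simp

theorem any_oc2_eq_tAny (M : List String) :
    (List.range (M.length - 2)).any (fun k => oc2 M[k]? M[k+1]? M[k+2]?) = tAny M := by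
  induction M with
  | nil => simp [tAny]
  | cons a M ih =>
    cases M with
    | nil => simp [tAny]
    | cons b R =>
      cases R with
      | nil => simp [tAny]
      | cons c S =>
        have hlen : (a :: b :: c :: S).length - 2 = ((b :: c :: S).length - 2) + 1 := by simp
        rw [hlen, List.range_succ_eq_map]
        simp only [List.any_cons, List.any_map]
        rw [show ((fun k => oc2 (a :: b :: c :: S)[k]? (a :: b :: c :: S)[k+1]? (a :: b :: c :: S)[k+2]?) ∘ Nat.succ)
              = (fun k => oc2 (b :: c :: S)[k]? (b :: c :: S)[k+1]? (b :: c :: S)[k+2]?) from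
            funext fun k => by simp [Function.comp, Nat.succ_eq_add_one]]
        rw [ih]
        show (oc2 (a :: b :: c :: S)[0]? (a :: b :: c :: S)[0+1]? (a :: b :: c :: S)[0+2]? || tAny (b :: c :: S))
              = tAny (a :: b :: c :: S)
        show _ = (oc2 (some a) (some b) (some c) || tAny (b :: c :: S))
        simp

theorem A_char (ts : List (String × String)) :
    is_task_sentence ts = (pAny (ts.map Prod.snd) || tAny (ts.map Prod.snd)) := by
  unfold is_task_sentence
  rw [aLoop1_any, aLoop2_any, PySem.List.pyRange_one, PySem.List.pyRange_one]
  simp only [List.any_map]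
  have e1 : (((ts.length : Int) - 1) - 0).toNat = (ts.map Prod.snd).length - 1 := by simp
  have e2 : (((ts.length : Int) - 2) - 0).toNat = (ts.map Prod.snd).length - 2 := by simp; omega
  rw [e1, e2]
  rw [show (condA1 ts ∘ fun k : Nat => 0 + (k : Int))
        = (fun k : Nat => oc1 (ts.map Prod.snd)[k]? (ts.map Prod.snd)[k+1]?) from
      funext fun k => by simp only [Function.comp_apply, zero_add]; exact condA1_cast ts k]
  rw [show (condA2 ts ∘ fun k : Nat => 0 + (k : Int))
        = (fun k : Nat => oc2 (ts.map Prod.snd)[k]? (ts.map Prod.snd)[k+1]? (ts.map Prod.snd)[k+2]?) from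
      funext fun k => by simp only [Function.comp_apply, zero_add]; exact condA2_cast ts k]
  rw [any_oc1_eq_pAny, any_oc2_eq_tAny]

theorem bLoop_some_some (rest : List (String × String)) :
    ∀ a b : String, bLoop (some a) (some b) rest
      = (pAny (b :: rest.map Prod.snd) || tAny (a :: b :: rest.map Prod.snd)) := by
  induction rest with
  | nil => intro a b; simp [bLoop, pAny, tAny]
  | cons t ts ih =>
    intro a b
    show (if _ then true else if _ then true else bLoop (some b) (some t.2) ts) = _
    rw [if_bool, if_bool, ih b t.2, List.map_cons]
    rw [show pAny (b :: t.2 :: ts.map Prod.snd)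
          = (oc1 (some b) (some t.2) || pAny (t.2 :: ts.map Prod.snd)) from rfl]
    rw [show tAny (a :: b :: t.2 :: ts.map Prod.snd)
          = (oc2 (some a) (some b) (some t.2) || tAny (b :: t.2 :: ts.map Prod.snd)) from rfl]
    rw [or_shuffle]
    simp [oc1, oc2, beq_eq_decide, Bool.or_assoc]

theorem bLoop_none_some (rest : List (String × String)) (b : String) :
    bLoop none (some b) rest
      = (pAny (b :: rest.map Prod.snd) || tAny (b :: rest.map Prod.snd)) := by
  cases rest with
  | nil => simp [bLoop, pAny, tAny]
  | cons t ts =>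
    show (if _ then true else if _ then true else bLoop (some b) (some t.2) ts) = _
    rw [if_bool, if_bool, bLoop_some_some ts b t.2, List.map_cons]
    rw [show pAny (b :: t.2 :: ts.map Prod.snd)
          = (oc1 (some b) (some t.2) || pAny (t.2 :: ts.map Prod.snd)) from rfl]
    simp [oc1, beq_eq_decide, Bool.or_assoc]

theorem B_char (ts : List (String × String)) :
    is_task_sentence_alt ts = (pAny (ts.map Prod.snd) || tAny (ts.map Prod.snd)) := by
  unfold is_task_sentence_alt
  cases ts with
  | nil => simp [bLoop, pAny, tAny]
  | cons t ts =>
    show (if _ then true else if _ then true else bLoop none (some t.2) ts) = _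
    rw [if_bool, if_bool, bLoop_none_some ts t.2, List.map_cons]
    simp

-- ===== VERDICT (by name: the statement is the Claim_ definition above) =====
theorem is_task_sentence_spec : Claim_equal_is_task_sentence := by
  intro pos_tags _
  unfold Spec_is_task_sentence
  rw [A_char, B_char]
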